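-- pv_equiv track=rewrite | github.com/usrofgh/pylearning | a.py | consonant_value
-- ===== SOURCE A (Python) =====
-- import string as s
--
-- def consonant_value(string: str) -> int:
--     if len(string) == 1:
--         return 0
--     alphab = s.ascii_lowercase
--     volums = "aeiou"
--     res = []
--     buff = 0
--
--     for i in range(len(string)):
--         if string[i] not in volums:
--             buff += alphab.index(string[i]) + 1
--
--             if i + 1 == len(string):
--                 res.append(buff)
--                 break
--             else:
--                 continue
--         if buff:
--             res.append(buff)
--         buff = 0
--     return max(res) if res else 0
-- ===== SOURCE B (Python) =====
-- import string as s
-- import re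
--
-- def consonant_value(string: str) -> int:
--     if len(string) == 1:
--         return 0
--     alphab = s.ascii_lowercase
--     values = [sum(alphab.index(c) + 1 for c in group)
--               for group in re.split('[aeiou]', string) if group]
--     return max(values) if values else 0
-- ===== Notes on version B (the rewrite author's own statement) =====
-- stated objective: simpler
-- what changed: Replaces A's index loop with manual buffer/flush/break bookkeeping by splitting the string on vowels with re.split, mapping each non-empty consonant group to its letter-value sum, and taking the max of that list.
import Mathlib
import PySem

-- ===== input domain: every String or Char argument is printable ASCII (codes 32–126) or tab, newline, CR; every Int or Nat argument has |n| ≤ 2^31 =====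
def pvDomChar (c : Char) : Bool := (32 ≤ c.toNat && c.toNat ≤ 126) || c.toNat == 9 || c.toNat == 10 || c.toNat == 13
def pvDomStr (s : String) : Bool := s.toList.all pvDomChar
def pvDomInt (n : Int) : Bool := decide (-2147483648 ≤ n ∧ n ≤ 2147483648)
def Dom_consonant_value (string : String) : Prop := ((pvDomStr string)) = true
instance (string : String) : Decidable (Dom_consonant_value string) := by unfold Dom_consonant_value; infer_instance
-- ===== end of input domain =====

-- B replaces A's manual buffer/flush/break loop by split-on-vowels, map group sums, max (objective: simpler).

-- ===== PORT A =====
-- the shared constants of Source A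
def pvAlphab : List Char := "abcdefghijklmnopqrstuvwxyz".toList
def pvVolums : List Char := "aeiou".toList

-- A's for-loop over range(len(string)), transliterated as recursion on the index i with
-- state (res, buff); the `break` returns res directly; `alphab.index` (ValueError on a
-- non-lowercase char, excluded by Pre_) is PySem.List.index? with a default.
def pvALoop (cs : List Char) (i : Nat) (res : List Int) (buff : Int) : List Int :=
  if h : i < cs.length then
    if cs[i] ∉ pvVolums then
      let buff' := buff + (((PySem.List.index? pvAlphab cs[i]).getD 0 : Nat) : Int) + 1
      if i + 1 = cs.length then res ++ [buff']          -- append then break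
      else pvALoop cs (i + 1) res buff'                 -- continue
    else
      let res' := if buff ≠ 0 then res ++ [buff] else res
      pvALoop cs (i + 1) res' 0
  else res
termination_by cs.length - i

def consonant_value (string : String) : Int :=
  if string.toList.length = 1 then 0
  else
    let res := pvALoop string.toList 0 [] 0
    if res ≠ [] then (PySem.List.max? res (fun x => x)).getD 0 else 0

-- ===== PORT B =====
-- re.split('[aeiou]', string): hand-ported (no PySem regex); exact for this one-character-class
-- pattern: the substrings of non-vowel characters between vowel occurrences, kept in order,
-- including empty ones (one more group than vowels).
def pvSplitVowels : List Char → List (List Char)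
  | [] => [[]]
  | c :: t =>
    if c ∈ pvVolums then [] :: pvSplitVowels t
    else match pvSplitVowels t with
      | g :: gs => (c :: g) :: gs
      | [] => [[c]]       -- unreachable: pvSplitVowels never returns []

-- sum(alphab.index(c) + 1 for c in group)
def pvGroupVal (g : List Char) : Int :=
  (g.map (fun c => (((PySem.List.index? pvAlphab c).getD 0 : Nat) : Int) + 1)).sum

def consonant_value_alt (string : String) : Int :=
  if string.toList.length = 1 then 0
  else
    let values := ((pvSplitVowels string.toList).filter (· ≠ [])).map pvGroupVal
    if values ≠ [] then (PySem.List.max? values (fun x => x)).getD 0 else 0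

-- ===== PRECONDITION & SPEC =====
-- Pre_ excludes exactly the inputs on which the Python A raises ValueError (alphab.index):
-- strings of length ≠ 1 containing a character that is not a lowercase ASCII letter.
def Pre_consonant_value (string : String) : Prop :=
  string.toList.length = 1 ∨ (string.toList.all (fun c => pvAlphab.contains c)) = true
instance (string : String) : Decidable (Pre_consonant_value string) := by
  unfold Pre_consonant_value; infer_instance

def pvWitness_consonant_value : String := "bc"

def Spec_consonant_value (string : String) (out : Int) : Prop := out = consonant_value_alt string
instance (string : String) (out : Int) : Decidable (Spec_consonant_value string out) := by unfold Spec_consonant_value; infer_instance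

-- ===== CLAIM (what is proved, stated in full; the proofs are below) =====
def Claim_equal_consonant_value : Prop := ∀ (string : String), Dom_consonant_value string → Pre_consonant_value string → Spec_consonant_value string (consonant_value string)

-- ===== LEMMAS AND PROOFS =====

-- per-character value used by both ports; always ≥ 1
def pvW (c : Char) : Int := (((PySem.List.index? pvAlphab c).getD 0 : Nat) : Int) + 1

theorem pvW_pos (c : Char) : 1 ≤ pvW c := by
  unfold pvW
  have := Int.natCast_nonneg ((PySem.List.index? pvAlphab c).getD 0)
  omega

-- accumulator-free description of A's loop output (the flushed group sums)
def pvVals (buff : Int) : List Char → List Int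
  | [] => []
  | c :: t =>
    if c ∉ pvVolums then
      if t = [] then [buff + pvW c] else pvVals (buff + pvW c) t
    else
      (if buff ≠ 0 then [buff] else []) ++ pvVals 0 t

theorem pvALoop_eq_vals (cs : List Char) :
    ∀ (rest : List Char) (i : Nat) (res : List Int) (buff : Int), cs.drop i = rest →
      pvALoop cs i res buff = res ++ pvVals buff rest := by
  intro rest
  induction rest with
  | nil =>
      intro i res buff hnil
      rw [pvALoop]
      have hle := List.drop_eq_nil_iff.mp hnil
      have : ¬ i < cs.length := by omega
      simp [this, pvVals]
  | cons c t ih =>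
      intro i res buff hcons
      have hi : i < cs.length := by
        by_contra h
        rw [List.drop_eq_nil_iff.mpr (by omega)] at hcons; simp at hcons
      have hstep := List.drop_eq_getElem_cons hi
      rw [hcons] at hstep
      injection hstep with h1 h2
      have hget : cs[i] = c := h1.symm
      have hdrop : cs.drop (i + 1) = t := h2.symm
      rw [pvALoop]
      simp only [hi, dite_true, hget]
      by_cases hv : c ∉ pvVolums
      · by_cases hlast : i + 1 = cs.length
        · have ht : t = [] := by
            rw [← hdrop, List.drop_eq_nil_iff]; omega
          simp [hv, hlast, pvVals, ht, pvW, add_assoc]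
        · have ht : t ≠ [] := by
            rw [← hdrop]; intro h
            rw [List.drop_eq_nil_iff] at h; omega
          have hrec := ih (i + 1) res (buff + (((PySem.List.index? pvAlphab c).getD 0 : Nat) : Int) + 1) hdrop
          simp [hv, hlast, pvVals, ht, pvW, add_assoc]
          rw [← add_assoc]
          exact hrec
      · have hrec := ih (i + 1) (if buff ≠ 0 then res ++ [buff] else res) 0 hdrop
        simp only [hv, if_false, hrec]
        simp only [pvVals, hv, if_false]
        split_ifs <;> simp

-- B-side: group values with the flush rule, matching pvVals group by group
def pvBVals (buff : Int) : List (List Char) → List Int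
  | [] => []
  | g :: gs => (if buff + pvGroupVal g ≠ 0 then [buff + pvGroupVal g] else []) ++ pvBVals 0 gs

theorem pvGroupVal_nonneg (g : List Char) : 0 ≤ pvGroupVal g := by
  induction g with
  | nil => simp [pvGroupVal]
  | cons c t ih =>
      have h := pvW_pos c
      unfold pvW at h
      simp only [pvGroupVal, List.map_cons, List.sum_cons] at *
      omega

theorem pvGroupVal_pos (g : List Char) (h : g ≠ []) : 1 ≤ pvGroupVal g := by
  cases g with
  | nil => simp at h
  | cons c t =>
      have h1 := pvW_pos c
      have h2 := pvGroupVal_nonneg t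
      unfold pvW at h1
      simp only [pvGroupVal, List.map_cons, List.sum_cons] at *
      omega

theorem pvSplitVowels_ne_nil (cs : List Char) : pvSplitVowels cs ≠ [] := by
  cases cs with
  | nil => simp [pvSplitVowels]
  | cons c t =>
      simp only [pvSplitVowels]
      split_ifs
      · simp
      · cases pvSplitVowels t <;> simp

theorem pvVals_eq_bvals (t : List Char) : ∀ (buff : Int), 0 ≤ buff →
    (t = [] → buff = 0) →
    pvVals buff t = pvBVals buff (pvSplitVowels t) := by
  induction t with
  | nil =>
      intro buff _ hnil
      simp [pvVals, pvSplitVowels, pvBVals, pvGroupVal, hnil rfl]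
  | cons c t ih =>
      intro buff hb _
      by_cases hv : c ∉ pvVolums
      · by_cases ht : t = []
        · subst ht
          have hw := pvW_pos c
          have hgv : pvGroupVal [c] = pvW c := by simp [pvGroupVal, pvW]
          have hne : buff + pvGroupVal [c] ≠ 0 := by rw [hgv]; omega
          simp [pvVals, pvSplitVowels, pvBVals, hv, hgv]
          omega
        · have hb' : 0 ≤ buff + pvW c := by have := pvW_pos c; omega
          have hrec := ih (buff + pvW c) hb' (fun h => absurd h ht)
          simp only [pvVals, hv, if_true, if_neg ht, hrec, not_false_iff]
          simp only [pvSplitVowels, hv, if_false]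
          rcases htl : pvSplitVowels t with _ | ⟨g, gs⟩
          · exact absurd htl (pvSplitVowels_ne_nil t)
          · simp only [pvBVals]
            have hgv : pvGroupVal (c :: g) = pvW c + pvGroupVal g := by
              simp [pvGroupVal, pvW]
            have hwp := pvW_pos c
            have hgn := pvGroupVal_nonneg g
            have hne : buff + pvGroupVal (c :: g) ≠ 0 := by rw [hgv]; omega
            have hne' : buff + pvW c + pvGroupVal g ≠ 0 := by omega
            rw [if_pos hne, if_pos hne', hgv]
            simp [add_assoc]
      · have hv' : c ∈ pvVolums := not_not.mp hv
        have hrec := ih 0 le_rfl (fun _ => rfl)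
        have h0 : pvGroupVal ([] : List Char) = 0 := by simp [pvGroupVal]
        simp only [pvVals, hv, if_false, hrec]
        simp [pvSplitVowels, hv', pvBVals, h0]

theorem pvBVals_zero_eq_map_filter (gs : List (List Char)) :
    pvBVals 0 gs = (gs.filter (· ≠ [])).map pvGroupVal := by
  induction gs with
  | nil => simp [pvBVals]
  | cons g t ih =>
      simp only [pvBVals, zero_add, ih, List.filter_cons]
      by_cases hg : g = []
      · subst hg
        have h0 : pvGroupVal ([] : List Char) = 0 := by simp [pvGroupVal]
        simp [h0]
      · have := pvGroupVal_pos g hg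
        have hne : pvGroupVal g ≠ 0 := by omega
        simp [hg, hne]

theorem pv_core (cs : List Char) :
    pvALoop cs 0 [] 0 = ((pvSplitVowels cs).filter (· ≠ [])).map pvGroupVal := by
  rw [pvALoop_eq_vals cs cs 0 [] 0 (by simp), List.nil_append,
      pvVals_eq_bvals cs 0 le_rfl (fun _ => rfl), pvBVals_zero_eq_map_filter]

-- ===== VERDICT (by name: the statement is the Claim_ definition above) =====
theorem consonant_value_spec : Claim_equal_consonant_value := by
  intro string _ _
  unfold Spec_consonant_value consonant_value consonant_value_alt
  rw [pv_core]
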